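-- pv_equiv track=rewrite | github.com/Yaachaka/pyPractice1 | bhch13/bhch13exrc23.py | check
-- ===== SOURCE A (Python) =====
-- def check(s):
-- 	flag = 0
-- 	for i in s:
-- 		for j in i:
-- 			if i.count(j) != 1:
-- 				flag = 1
-- 				break
-- 		if flag:
-- 			break
-- 	return not flag
-- ===== SOURCE B (Python) =====
-- def check(s):
--     for i in s:
--         t = sorted(i)
--         for a, b in zip(t, t[1:]):
--             if a == b:
--                 return False
--     return True
-- ===== Notes on version B (the rewrite author's own statement) =====
-- stated objective: alternative
-- what changed: A rescans the whole string with str.count for every character (quadratic per string); B sorts each string once and checks adjacent pairs for equality.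
import Mathlib
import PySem

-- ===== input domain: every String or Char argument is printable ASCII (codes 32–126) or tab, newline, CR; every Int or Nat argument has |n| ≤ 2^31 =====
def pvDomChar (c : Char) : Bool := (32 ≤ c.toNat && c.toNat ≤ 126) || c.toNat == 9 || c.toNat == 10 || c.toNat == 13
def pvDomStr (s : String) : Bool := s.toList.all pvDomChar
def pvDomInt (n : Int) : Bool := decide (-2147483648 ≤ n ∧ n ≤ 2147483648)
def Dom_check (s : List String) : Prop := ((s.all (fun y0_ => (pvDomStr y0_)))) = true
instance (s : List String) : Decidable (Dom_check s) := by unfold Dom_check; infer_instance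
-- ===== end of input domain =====

-- B replaces A's per-character whole-string count rescan with sort-then-adjacent-compare; return value only.

-- ===== PORT A =====
-- inner 'for j in i' loop: returns true iff it sets flag (and breaks)
def checkInnerA (full : List Char) : List Char → Bool
  | [] => false
  | j :: rest => if full.count j ≠ 1 then true else checkInnerA full rest

-- outer 'for i in s' loop: value of flag at the end
def checkOuterA : List String → Bool
  | [] => false
  | i :: rest => if checkInnerA i.toList i.toList then true else checkOuterA rest

def check (s : List String) : Bool := !(checkOuterA s)

-- ===== PORT B =====
-- 'for a, b in zip(t, t[1:])' scan: true iff some adjacent pair is equal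
def adjDup : List Char → Bool
  | a :: b :: rest => if a == b then true else adjDup (b :: rest)
  | _ => false

def check_alt : List String → Bool
  | [] => true
  | i :: rest =>
      if adjDup (PySem.List.sorted i.toList (fun x => x) false) then false
      else check_alt rest

-- ===== PRECONDITION & SPEC =====
def Spec_check (s : List String) (out : Bool) : Prop := out = check_alt s
instance (s : List String) (out : Bool) : Decidable (Spec_check s out) := by unfold Spec_check; infer_instance

-- ===== CLAIM (what is proved, stated in full; the proofs are below) =====
def Claim_equal_check : Prop := ∀ (s : List String), Dom_check s → Spec_check s (check s)

-- ===== LEMMAS AND PROOFS =====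

theorem checkInnerA_true_iff (full : List Char) (sub : List Char) :
    checkInnerA full sub = true ↔ ∃ j ∈ sub, full.count j ≠ 1 := by
  induction sub with
  | nil => simp [checkInnerA]
  | cons j rest ih =>
      by_cases h : full.count j ≠ 1 <;> simp [checkInnerA, h, ih]

theorem checkInnerA_full_iff (full : List Char) :
    checkInnerA full full = true ↔ ¬ full.Nodup := by
  rw [checkInnerA_true_iff, List.nodup_iff_count_eq_one]
  push Not
  rfl

theorem adjDup_true_iff (t : List Char) (hs : t.Pairwise (· ≤ ·)) :
    adjDup t = true ↔ ¬ t.Nodup := by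
  induction t with
  | nil => simp [adjDup]
  | cons a t ih =>
      cases t with
      | nil => simp [adjDup]
      | cons b r =>
          rcases List.pairwise_cons.mp hs with ⟨ha, hbr⟩
          by_cases hab : a = b
          · subst hab
            simp [adjDup]
          · have hnotmem : a ∉ b :: r := by
              intro hmem
              rcases List.mem_cons.mp hmem with h | hmem
              · exact hab h
              · have h1 : a ≤ b := ha b (by simp)
                have h2 : b ≤ a := (List.pairwise_cons.mp hbr).1 a hmem
                exact hab (le_antisymm h1 h2)
            have : adjDup (a :: b :: r) = adjDup (b :: r) := by
              simp [adjDup, hab]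
            rw [this, ih hbr]
            simp [List.nodup_cons, hnotmem]

theorem inner_eq_adj (i : String) :
    checkInnerA i.toList i.toList =
      adjDup (PySem.List.sorted i.toList (fun x => x) false) := by
  have hperm : (PySem.List.sorted i.toList (fun x => x) false).Perm i.toList :=
    PySem.List.sorted_perm ..
  have hpw : (PySem.List.sorted i.toList (fun x => x) false).Pairwise
      (fun a b => (fun x => x) a ≤ (fun x => x) b) := PySem.List.sorted_pairwise ..
  have h1 := checkInnerA_full_iff i.toList
  have h2 := adjDup_true_iff (PySem.List.sorted i.toList (fun x => x) false) hpw
  rw [hperm.nodup_iff] at h2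
  rw [← h1] at h2
  cases hA : checkInnerA i.toList i.toList <;>
    cases hB : adjDup (PySem.List.sorted i.toList (fun x => x) false) <;>
      simp [hA, hB] at h2 ⊢

-- ===== VERDICT (by name: the statement is the Claim_ definition above) =====
theorem check_spec : Claim_equal_check := by
  intro s hd
  unfold Spec_check
  induction s with
  | nil => rfl
  | cons i rest ih =>
      have hd' : Dom_check rest := by
        simp only [Dom_check, List.all_cons, Bool.and_eq_true] at hd
        exact hd.2
      have ih' := ih hd'
      have hrest : checkOuterA rest = !check_alt rest := by
        rw [← ih']; simp [check]
      rw [show check (i :: rest) = !(checkOuterA (i :: rest)) from rfl,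
        checkOuterA, check_alt, ← inner_eq_adj]
      cases h : checkInnerA i.toList i.toList <;> simp [h, hrest]
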